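-- pv_equiv track=rewrite | github.com/Gaorav-Gupta-Lab/Volundr | volundr/Smith_Waterman.py | alignment_string
-- ===== SOURCE A (Python) =====
-- def alignment_string(aligned_seq1, aligned_seq2):
--     """
--     Construct a special string showing identities, gaps, and mismatches.
--     This string is printed between the two aligned sequences and shows the
--     identities (|), gaps (-), and mismatches (:). As the string is constructed,
--     it also counts number of identities, gaps, and mismatches and returns the
--     counts along with the alignment string.
--     AAGGATGCCTCAAATCGATCT-TTTTCTTGG-
--     ::||::::::||:|::::::: |:  :||:|   <-- alignment string
--     CTGGTACTTGCAGAGAAGGGGGTA--ATTTGG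
--     """
--     # Build the string as a list of characters to avoid costly string
--     # concatenation.
--     idents, gaps, mismatches = 0, 0, 0
--     algnment_string = []
--     for base1, base2 in zip(aligned_seq1, aligned_seq2):
--         if base1 == base2:
--             algnment_string.append('|')
--             idents += 1
--         elif '-' in (base1, base2):
--             algnment_string.append(' ')
--             gaps += 1
--         else:
--             algnment_string.append(':')
--             mismatches += 1
--
--     return ''.join(algnment_string), idents, gaps, mismatches
-- ===== SOURCE B (Python) =====
-- def alignment_string(aligned_seq1, aligned_seq2):
--     # Position-list decomposition: first collect the index lists of identities
--     # and gaps over the overlap, then assemble the symbol string by writing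
--     # into a ':'-prefilled buffer at those positions; the mismatch count falls
--     # out by arithmetic (n - identities - gaps) instead of being tallied.
--     n = min(len(aligned_seq1), len(aligned_seq2))
--     ident_pos = [i for i in range(n) if aligned_seq1[i] == aligned_seq2[i]]
--     gap_pos = [i for i in range(n)
--                if aligned_seq1[i] != aligned_seq2[i]
--                and '-' in (aligned_seq1[i], aligned_seq2[i])]
--     out = [':'] * n
--     for i in ident_pos:
--         out[i] = '|'
--     for i in gap_pos:
--         out[i] = ' '
--     return ''.join(out), len(ident_pos), len(gap_pos), n - len(ident_pos) - len(gap_pos)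
-- ===== Notes on version B (the rewrite author's own statement) =====
-- stated objective: alternative
-- what changed: B replaces A's single classifying loop with inline counters by a position-list decomposition: it collects the index lists of identities and gaps, assembles the symbol string by writing '|' and ' ' into a ':'-prefilled buffer at those indices, and derives the mismatch count arithmetically as n - identities - gaps.
import Mathlib
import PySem

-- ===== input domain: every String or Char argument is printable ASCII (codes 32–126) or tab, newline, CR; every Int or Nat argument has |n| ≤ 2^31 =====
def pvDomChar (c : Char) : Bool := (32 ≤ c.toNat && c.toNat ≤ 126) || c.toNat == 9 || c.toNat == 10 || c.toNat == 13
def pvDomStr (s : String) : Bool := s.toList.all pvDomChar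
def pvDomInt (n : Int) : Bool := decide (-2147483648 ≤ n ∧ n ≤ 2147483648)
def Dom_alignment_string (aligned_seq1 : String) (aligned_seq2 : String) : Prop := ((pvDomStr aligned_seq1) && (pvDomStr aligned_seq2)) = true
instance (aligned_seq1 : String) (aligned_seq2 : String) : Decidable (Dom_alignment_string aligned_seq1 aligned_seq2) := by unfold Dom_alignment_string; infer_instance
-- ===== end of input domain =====

-- B assembles the symbol string from index lists of identities/gaps written into a
-- ':'-prefilled buffer and derives the mismatch count arithmetically (objective: alternative).


-- ===== PORT A =====
-- loop state: (algnment_string as a char list, idents, gaps, mismatches)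
def alignment_string (aligned_seq1 : String) (aligned_seq2 : String) : String × Int × Int × Int :=
  let st := (List.zip aligned_seq1.toList aligned_seq2.toList).foldl
    (fun (acc : List Char × Int × Int × Int) (p : Char × Char) =>
      if p.1 = p.2 then (acc.1 ++ ['|'], acc.2.1 + 1, acc.2.2.1, acc.2.2.2)
      else if p.1 = '-' ∨ p.2 = '-' then (acc.1 ++ [' '], acc.2.1, acc.2.2.1 + 1, acc.2.2.2)
      else (acc.1 ++ [':'], acc.2.1, acc.2.2.1, acc.2.2.2 + 1))
    ([], 0, 0, 0)
  (String.mk st.1, st.2.1, st.2.2.1, st.2.2.2)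

-- ===== PORT B =====
-- indexing aligned_seqk[i] is ported as List.getD (every index used is < n = min of the lengths, so in range)
def alignment_string_alt (aligned_seq1 : String) (aligned_seq2 : String) : String × Int × Int × Int :=
  let l1 := aligned_seq1.toList
  let l2 := aligned_seq2.toList
  let n := min l1.length l2.length
  let identPos := (List.range n).filter (fun i => l1.getD i ' ' == l2.getD i ' ')
  let gapPos := (List.range n).filter
    (fun i => (l1.getD i ' ' != l2.getD i ' ') && (l1.getD i ' ' == '-' || l2.getD i ' ' == '-'))
  let out0 := List.replicate n ':'
  let out1 := identPos.foldl (fun a i => a.set i '|') out0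
  let out2 := gapPos.foldl (fun a i => a.set i ' ') out1
  (String.mk out2, (identPos.length : Int), (gapPos.length : Int),
    (n : Int) - identPos.length - gapPos.length)

-- ===== PRECONDITION & SPEC =====
def Spec_alignment_string (aligned_seq1 : String) (aligned_seq2 : String) (out : String × Int × Int × Int) : Prop := out = alignment_string_alt aligned_seq1 aligned_seq2
instance (aligned_seq1 : String) (aligned_seq2 : String) (out : String × Int × Int × Int) : Decidable (Spec_alignment_string aligned_seq1 aligned_seq2 out) := by unfold Spec_alignment_string; infer_instance

-- ===== CLAIM (what is proved, stated in full; the proofs are below) =====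
def Claim_equal_alignment_string : Prop := ∀ (aligned_seq1 : String) (aligned_seq2 : String), Dom_alignment_string aligned_seq1 aligned_seq2 → Spec_alignment_string aligned_seq1 aligned_seq2 (alignment_string aligned_seq1 aligned_seq2)

-- ===== LEMMAS AND PROOFS =====
-- the symbol a pair of aligned bases classifies to (used only in the proofs, as the common form)
def pvSym (p : Char × Char) : Char :=
  if p.1 = p.2 then '|' else if p.1 = '-' ∨ p.2 = '-' then ' ' else ':'

-- A's fold in closed form: symbols as a map, counters as counts of the map
theorem pv_fold_inv (l : List (Char × Char)) (acc : List Char × Int × Int × Int) :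
    l.foldl
      (fun (acc : List Char × Int × Int × Int) (p : Char × Char) =>
        if p.1 = p.2 then (acc.1 ++ ['|'], acc.2.1 + 1, acc.2.2.1, acc.2.2.2)
        else if p.1 = '-' ∨ p.2 = '-' then (acc.1 ++ [' '], acc.2.1, acc.2.2.1 + 1, acc.2.2.2)
        else (acc.1 ++ [':'], acc.2.1, acc.2.2.1, acc.2.2.2 + 1)) acc
    = (acc.1 ++ l.map pvSym,
       acc.2.1 + ((l.map pvSym).count '|' : Int),
       acc.2.2.1 + ((l.map pvSym).count ' ' : Int),
       acc.2.2.2 + ((l.map pvSym).count ':' : Int)) := by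
  induction l generalizing acc with
  | nil => simp
  | cons p t ih =>
    simp only [List.foldl_cons, List.map_cons]
    by_cases h1 : p.1 = p.2
    · simp [h1, ih, pvSym, List.append_assoc, add_comm, add_left_comm]
    · by_cases h2 : p.1 = '-' ∨ p.2 = '-'
      · simp [h1, h2, ih, pvSym, List.append_assoc, add_comm, add_left_comm]
      · simp [h1, h2, ih, pvSym, List.append_assoc, add_comm, add_left_comm]

-- writing c at every index of ps, read back
theorem pv_foldl_set_get (ps : List Nat) (c : Char) (l : List Char) (j : Nat) :
    (ps.foldl (fun a i => a.set i c) l)[j]? =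
      if j ∈ ps ∧ j < l.length then some c else l[j]? := by
  induction ps generalizing l with
  | nil => simp
  | cons p t ih =>
    simp only [List.foldl_cons, ih, List.length_set, List.getElem?_set]
    by_cases hpj : p = j
    · subst hpj
      by_cases hm : p ∈ t <;> by_cases hl : p < l.length <;> simp [hm, hl]
    · by_cases hm : j ∈ t <;> simp [hm, hpj, Ne.symm hpj, List.mem_cons]

theorem pv_foldl_set_length (ps : List Nat) (c : Char) (l : List Char) :
    (ps.foldl (fun a i => a.set i c) l).length = l.length := by
  induction ps generalizing l with
  | nil => rfl
  | cons p t ih => simp [List.foldl_cons, ih]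

-- filtered range by a pointwise property of a list: same length as filtering the list
theorem pv_filter_range_length {α : Type} (l : List α) (d : α) (Q : α → Bool) :
    ((List.range l.length).filter (fun i => Q (l.getD i d))).length
      = (l.filter Q).length := by
  induction l with
  | nil => simp
  | cons x t ih =>
    rw [show (x :: t).length = t.length + 1 from rfl, List.range_succ_eq_map,
      List.filter_cons, List.filter_map]
    have hpred := List.filter_congr (l := List.range t.length)
      (p := (fun i => Q ((x :: t).getD i d)) ∘ Nat.succ)
      (q := fun i => Q (t.getD i d)) (fun i _ => by simp)
    rw [hpred]
    have ih' : (List.filter (fun i => Q (t[i]?.getD d)) (List.range t.length)).length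
        = (List.filter Q t).length := by simpa [List.getD] using ih
    by_cases hx : Q x <;> simp [hx, ih']

-- partition: every symbol is one of the three
theorem pv_count_partition (l : List (Char × Char)) :
    (l.map pvSym).count '|' + (l.map pvSym).count ' ' + (l.map pvSym).count ':'
      = l.length := by
  induction l with
  | nil => rfl
  | cons p t ih =>
    by_cases h1 : p.1 = p.2
    · simp [pvSym, h1]; omega
    · by_cases h2 : p.1 = '-' ∨ p.2 = '-'
      · simp [pvSym, h1, h2]; omega
      · simp [pvSym, h1, h2]; omega

-- ===== VERDICT (by name: the statement is the Claim_ definition above) =====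
-- index-level facts shared by the three components
theorem pv_zip_getD (l1 l2 : List Char) (i : Nat) (h : i < min l1.length l2.length) :
    (l1.zip l2).getD i (' ', ' ') = (l1.getD i ' ', l2.getD i ' ') := by
  have h1 : i < l1.length := lt_of_lt_of_le h (min_le_left _ _)
  have h2 : i < l2.length := lt_of_lt_of_le h (min_le_right _ _)
  have hz : i < (l1.zip l2).length := by simpa [List.length_zip] using h
  rw [List.getD_eq_getElem _ _ hz, List.getD_eq_getElem _ _ h1,
    List.getD_eq_getElem _ _ h2, List.getElem_zip]

theorem pv_count_filter (l1 l2 : List Char) (c : Char) (P : Char × Char → Bool)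
    (hP : ∀ p : Char × Char, pvSym p = c ↔ P p = true) :
    (((l1.zip l2).map pvSym).count c : Int)
      = (((List.range (min l1.length l2.length)).filter
          (fun i => P (l1.getD i ' ', l2.getD i ' '))).length : Int) := by
  have hlen : (l1.zip l2).length = min l1.length l2.length := List.length_zip ..
  have hcongr :
      ((List.range (min l1.length l2.length)).filter
          (fun i => P (l1.getD i ' ', l2.getD i ' ')))
        = ((List.range (l1.zip l2).length).filter
            (fun i => P ((l1.zip l2).getD i (' ', ' ')))) := by
    rw [hlen]
    refine List.filter_congr ?_
    intro i hi
    rw [pv_zip_getD l1 l2 i (List.mem_range.mp hi)]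
  rw [hcongr, pv_filter_range_length]
  have : ((l1.zip l2).map pvSym).count c = ((l1.zip l2).filter P).length := by
    rw [List.count_eq_countP, List.countP_map, ← List.countP_eq_length_filter]
    refine List.countP_congr ?_
    intro p _
    simp only [Function.comp_apply, beq_iff_eq]
    exact ⟨fun h => (hP p).mp h, fun h => (hP p).mpr h⟩
  rw [this]

theorem pv_out_eq (l1 l2 : List Char) :
    (((List.range (min l1.length l2.length)).filter
        (fun i => (l1.getD i ' ' != l2.getD i ' ')
          && (l1.getD i ' ' == '-' || l2.getD i ' ' == '-'))).foldl
      (fun a i => a.set i ' ')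
      (((List.range (min l1.length l2.length)).filter
          (fun i => l1.getD i ' ' == l2.getD i ' ')).foldl
        (fun a i => a.set i '|')
        (List.replicate (min l1.length l2.length) ':')))
    = (l1.zip l2).map pvSym := by
  set n := min l1.length l2.length with hn
  have hlen1 : (((List.range n).filter
      (fun i => l1.getD i ' ' == l2.getD i ' ')).foldl
      (fun a i => a.set i '|') (List.replicate n ':')).length = n := by
    rw [pv_foldl_set_length]; simp
  apply List.ext_getElem?
  intro j
  by_cases hj : j < n
  · have h1 : j < l1.length := lt_of_lt_of_le hj (min_le_left _ _)
    have h2 : j < l2.length := lt_of_lt_of_le hj (min_le_right _ _)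
    have hz : j < (l1.zip l2).length := by simp [List.length_zip, ← hn, hj]
    rw [pv_foldl_set_get, pv_foldl_set_get, hlen1]
    have hmap : ((l1.zip l2).map pvSym)[j]? = some (pvSym (l1[j], l2[j])) := by
      rw [List.getElem?_map]
      rw [List.getElem?_eq_getElem hz, List.getElem_zip]
      rfl
    rw [hmap]
    simp only [List.mem_filter, List.mem_range, List.length_replicate,
      List.getElem?_replicate, bne_iff_ne, beq_iff_eq, Bool.or_eq_true,
      Bool.and_eq_true, ne_eq]
    have hd1 : l1.getD j ' ' = l1[j] := List.getD_eq_getElem _ _ h1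
    have hd2 : l2.getD j ' ' = l2[j] := List.getD_eq_getElem _ _ h2
    rw [hd1, hd2]
    by_cases e : l1[j] = l2[j]
    · simp [e, hj, pvSym]
    · by_cases g : l1[j] = '-' ∨ l2[j] = '-'
      · simp [e, g, hj, pvSym]
      · simp [e, g, hj, pvSym]
  · rw [List.getElem?_eq_none (by rw [pv_foldl_set_length, hlen1]; omega),
      List.getElem?_eq_none
        (by simp only [List.length_map, List.length_zip, ← hn]; omega)]

-- ===== VERDICT (by name: the statement is the Claim_ definition above) =====
theorem alignment_string_spec : Claim_equal_alignment_string := by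
  intro s1 s2 _
  unfold Spec_alignment_string alignment_string alignment_string_alt
  simp only [pv_fold_inv, List.nil_append, zero_add]
  set l1 := s1.toList
  set l2 := s2.toList
  have hI := pv_count_filter l1 l2 '|' (fun p => p.1 == p.2) (by
    intro p; constructor
    · intro h; by_contra hne
      simp only [beq_iff_eq] at hne
      by_cases g : p.1 = '-' ∨ p.2 = '-' <;> simp [pvSym, hne, g] at h
    · intro h; simp only [beq_iff_eq] at h; simp [pvSym, h])
  have hG := pv_count_filter l1 l2 ' '
      (fun p => (p.1 != p.2) && (p.1 == '-' || p.2 == '-')) (by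
    intro p
    by_cases e : p.1 = p.2
    · simp [pvSym, e]
    · by_cases g : p.1 = '-' ∨ p.2 = '-' <;> simp [pvSym, e, g])
  have hpart := pv_count_partition (l1.zip l2)
  have hzlen : (l1.zip l2).length = min l1.length l2.length := List.length_zip ..
  refine Prod.ext ?_ (Prod.ext ?_ (Prod.ext ?_ ?_))
  · simpa using congrArg String.mk (pv_out_eq l1 l2).symm
  · simpa using hI
  · simpa using hG
  · simp only []
    rw [← hzlen] at hI hG ⊢
    push_cast at hI hG ⊢
    omega
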